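-- pv_equiv track=rewrite | github.com/mohdaman892/Leetcode-Solutions | 3774-check-if-digits-are-equal-in-string-after-operations-ii/check-if-digits-are-equal-in-string-after-operations-ii.py | _get_coefficient_mod_10_impl
-- ===== SOURCE A (Python) =====
-- PASCAL_MOD_5 = [
--     [1],
--     [1, 1],
--     [1, 2, 1],
--     [1, 3, 3, 1],
--     [1, 4, 1, 4, 1]
-- ]
--
-- def _get_coefficient_mod_10_impl(K, j):
--     if j < 0 or j > K:
--         return 0
--
--     val_mod_2 = 1 if (K & j) == j else 0
--
--     val_mod_5 = 1
--     temp_K, temp_j = K, j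
--     while temp_K > 0 or temp_j > 0:
--         K_digit = temp_K % 5
--         j_digit = temp_j % 5
--
--         if j_digit > K_digit:
--             val_mod_5 = 0
--             break
--
--         val_mod_5 = (val_mod_5 * PASCAL_MOD_5[K_digit][j_digit]) % 5
--
--         temp_K //= 5
--         temp_j //= 5
--
--     return (val_mod_2 * 5 + val_mod_5 * 6) % 10
-- ===== SOURCE B (Python) =====
-- # B: one uniform recursive Lucas helper for both primes (2 and 5), instead of
-- # A's bit-trick for mod 2 plus an iterative base-5 digit loop.
--
-- PASCAL_MOD_2 = [
--     [1],
--     [1, 1],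
-- ]
--
-- PASCAL_MOD_5 = [
--     [1],
--     [1, 1],
--     [1, 2, 1],
--     [1, 3, 3, 1],
--     [1, 4, 1, 4, 1]
-- ]
--
--
-- def _lucas(K, j, p, table):
--     """C(K, j) mod p for 0 <= j <= K and prime p, by Lucas' theorem."""
--     if K == 0 and j == 0:
--         return 1
--     K_digit, j_digit = K % p, j % p
--     if j_digit > K_digit:
--         return 0
--     return (table[K_digit][j_digit] * _lucas(K // p, j // p, p, table)) % p
--
--
-- def _get_coefficient_mod_10_impl(K, j):
--     if j < 0 or j > K:
--         return 0
--     val_mod_2 = _lucas(K, j, 2, PASCAL_MOD_2)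
--     val_mod_5 = _lucas(K, j, 5, PASCAL_MOD_5)
--     return (val_mod_2 * 5 + val_mod_5 * 6) % 10
-- ===== Notes on version B (the rewrite author's own statement) =====
-- stated objective: alternative
-- what changed: Replaced A's (K&j)==j bit trick for the mod-2 factor and its iterative base-5 digit loop for the mod-5 factor with one uniform recursive Lucas helper lucas(K,j,p,table) applied at p=2 and p=5, combined by the same CRT step.
import Mathlib
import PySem

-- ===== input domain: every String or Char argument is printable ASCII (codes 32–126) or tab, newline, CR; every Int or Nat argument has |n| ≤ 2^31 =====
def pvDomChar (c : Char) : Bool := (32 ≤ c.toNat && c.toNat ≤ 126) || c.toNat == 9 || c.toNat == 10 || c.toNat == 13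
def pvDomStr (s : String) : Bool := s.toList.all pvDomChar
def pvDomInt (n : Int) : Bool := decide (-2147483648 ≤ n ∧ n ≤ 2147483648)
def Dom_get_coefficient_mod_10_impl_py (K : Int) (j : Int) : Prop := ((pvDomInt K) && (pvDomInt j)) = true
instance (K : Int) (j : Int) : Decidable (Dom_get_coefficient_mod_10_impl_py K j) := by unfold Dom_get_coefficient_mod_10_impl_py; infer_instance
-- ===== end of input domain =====

-- B replaces A's bit-trick (mod 2) and iterative base-5 digit loop (mod 5) by one uniform
-- recursive Lucas helper used for both primes; objective: alternative decomposition, same cost.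

-- ===== PORT A =====
def pascalMod5 : List (List Int) :=
  [[1], [1, 1], [1, 2, 1], [1, 3, 3, 1], [1, 4, 1, 4, 1]]

-- A's while loop; it only ever runs with nonnegative temp_K, temp_j (the guard ensures
-- 0 ≤ j ≤ K), so the loop state is carried as Nat — exact for those values.
def loop5A (tK tj : Nat) (acc : Int) : Int :=
  if tK > 0 ∨ tj > 0 then
    let Kd := tK % 5
    let jd := tj % 5
    if jd > Kd then 0
    else loop5A (tK / 5) (tj / 5) ((acc * (pascalMod5[Kd]!)[jd]!) % 5)
  else acc
termination_by tK + tj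
decreasing_by omega

def get_coefficient_mod_10_impl_py (K : Int) (j : Int) : Int :=
  if j < 0 ∨ j > K then 0
  else
    -- (K & j) == j on nonnegative ints: exact via Nat.land after the guard
    let val_mod_2 : Int := if K.toNat &&& j.toNat = j.toNat then 1 else 0
    let val_mod_5 : Int := loop5A K.toNat j.toNat 1
    (val_mod_2 * 5 + val_mod_5 * 6) % 10

-- ===== PORT B =====
def pascalMod2 : List (List Int) := [[1], [1, 1]]

-- B's recursive _lucas helper; called only with 0 ≤ j ≤ K, hence Nat arguments (exact there).
-- The proof 2 ≤ p is the termination argument for K/p, j/p; Python needs none.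
def lucasB (p : Nat) (hp : 2 ≤ p) (table : List (List Int)) (K j : Nat) : Int :=
  if K = 0 ∧ j = 0 then 1
  else
    let Kd := K % p
    let jd := j % p
    if jd > Kd then 0
    else ((table[Kd]!)[jd]! * lucasB p hp table (K / p) (j / p)) % p
termination_by K + j
decreasing_by
  have hK : K / p < K ∨ K = 0 := by
    rcases Nat.eq_zero_or_pos K with h | h
    · exact Or.inr h
    · exact Or.inl (Nat.div_lt_self h (by omega))
  have hj : j / p < j ∨ j = 0 := by
    rcases Nat.eq_zero_or_pos j with h | h
    · exact Or.inr h
    · exact Or.inl (Nat.div_lt_self h (by omega))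
  have hKle : K / p ≤ K := Nat.div_le_self _ _
  have hjle : j / p ≤ j := Nat.div_le_self _ _
  omega

def get_coefficient_mod_10_impl_py_alt (K : Int) (j : Int) : Int :=
  if j < 0 ∨ j > K then 0
  else
    let val_mod_2 : Int := lucasB 2 (by omega) pascalMod2 K.toNat j.toNat
    let val_mod_5 : Int := lucasB 5 (by omega) pascalMod5 K.toNat j.toNat
    (val_mod_2 * 5 + val_mod_5 * 6) % 10

-- ===== PRECONDITION & SPEC =====
def Spec_get_coefficient_mod_10_impl_py (K : Int) (j : Int) (out : Int) : Prop := out = get_coefficient_mod_10_impl_py_alt K j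
instance (K : Int) (j : Int) (out : Int) : Decidable (Spec_get_coefficient_mod_10_impl_py K j out) := by unfold Spec_get_coefficient_mod_10_impl_py; infer_instance

-- ===== CLAIM (what is proved, stated in full; the proofs are below) =====
def Claim_equal_get_coefficient_mod_10_impl_py : Prop := ∀ (K : Int) (j : Int), Dom_get_coefficient_mod_10_impl_py K j → Spec_get_coefficient_mod_10_impl_py K j (get_coefficient_mod_10_impl_py K j)

-- ===== LEMMAS AND PROOFS =====

theorem lucasB_nonneg (p : Nat) (hp : 2 ≤ p) (t : List (List Int)) (K j : Nat) :
    0 ≤ lucasB p hp t K j ∧ lucasB p hp t K j < (p : Int) := by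
  fun_induction lucasB with
  | case1 => constructor <;> [norm_num; exact_mod_cast by omega]
  | case2 => constructor <;> [norm_num; exact_mod_cast by omega]
  | case3 p hp t K j h1 ih =>
    refine ⟨Int.emod_nonneg _ (by exact_mod_cast by omega), Int.emod_lt_of_pos _ (by exact_mod_cast by omega)⟩

theorem land_eq_iff (a b : Nat) :
    a &&& b = b ↔ (b % 2 ≤ a % 2 ∧ a / 2 &&& b / 2 = b / 2) := by
  constructor
  · intro h
    constructor
    · have h0 := congrArg (fun x => x.testBit 0) h
      simp only [Nat.testBit_zero] at h0
      rcases Nat.mod_two_eq_zero_or_one a with ha | ha <;>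
        rcases Nat.mod_two_eq_zero_or_one b with hb | hb <;> simp [ha, hb] at h0 ⊢
    · apply Nat.eq_of_testBit_eq
      intro i
      have hi := congrArg (fun x => x.testBit (i + 1)) h
      simp only [Nat.testBit_land] at hi
      simpa [Nat.testBit_div_two, Nat.testBit_land] using hi
  · rintro ⟨h0, h1⟩
    apply Nat.eq_of_testBit_eq
    intro i
    cases i with
    | zero =>
      simp only [Nat.testBit_zero]
      rcases Nat.mod_two_eq_zero_or_one a with ha | ha <;>
        rcases Nat.mod_two_eq_zero_or_one b with hb | hb <;> simp [ha, hb] at h0 ⊢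
    | succ i =>
      have := congrArg (fun x => x.testBit i) h1
      simp only [Nat.testBit_land, Nat.testBit_div_two] at this
      simpa [Nat.testBit_land] using this

theorem lucasB_eq_ite (p hp t K j) : lucasB p hp t K j =
  if K = 0 ∧ j = 0 then 1
  else if j % p > K % p then 0
  else ((t[K % p]!)[j % p]! * lucasB p hp t (K / p) (j / p)) % p := by
  rw [lucasB]

theorem lucasB_two_aux (n : Nat) : ∀ a b : Nat, a + b ≤ n →
    lucasB 2 (by omega) pascalMod2 a b = if a &&& b = b then 1 else 0 := by
  induction n with
  | zero =>
    intro a b h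
    have ha : a = 0 := by omega
    have hb : b = 0 := by omega
    subst ha; subst hb
    rw [lucasB_eq_ite]; simp
  | succ n ih =>
    intro a b h
    rw [lucasB_eq_ite]
    by_cases hbase : a = 0 ∧ b = 0
    · simp [hbase.1, hbase.2]
    · rw [if_neg hbase]
      by_cases hgt : b % 2 > a % 2
      · have hne : ¬ (a &&& b = b) := by rw [land_eq_iff]; omega
        rw [if_pos hgt, if_neg hne]
      · have hrec := ih (a / 2) (b / 2) (by omega)
        have hentry : (pascalMod2[a % 2]!)[b % 2]! = 1 := by
          rcases Nat.mod_two_eq_zero_or_one a with hK | hK <;>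
            rcases Nat.mod_two_eq_zero_or_one b with hj | hj <;>
              simp [pascalMod2, hK, hj] <;> omega

        rw [if_neg hgt, hentry, one_mul, hrec]
        have hiff := land_eq_iff a b
        by_cases hd : a / 2 &&& b / 2 = b / 2
        · rw [if_pos hd, if_pos (hiff.mpr ⟨by omega, hd⟩)]; norm_num
        · rw [if_neg hd, if_neg (fun hc => hd (hiff.mp hc).2)]; norm_num

theorem lucasB_two (a b : Nat) :
    lucasB 2 (by omega) pascalMod2 a b = if a &&& b = b then 1 else 0 :=
  lucasB_two_aux (a + b) a b le_rfl


theorem loop5A_eq_ite (tK tj : Nat) (acc : Int) : loop5A tK tj acc =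
    if tK > 0 ∨ tj > 0 then
      if tj % 5 > tK % 5 then 0
      else loop5A (tK / 5) (tj / 5) ((acc * (pascalMod5[tK % 5]!)[tj % 5]!) % 5)
    else acc := by
  rw [loop5A]

theorem loop5A_eq_aux (n : Nat) : ∀ (tK tj : Nat) (acc : Int), tK + tj ≤ n →
    0 ≤ acc → acc < 5 →
    loop5A tK tj acc = (acc * lucasB 5 (by omega) pascalMod5 tK tj) % 5 := by
  induction n with
  | zero =>
    intro tK tj acc h h0 h5
    have hK : tK = 0 := by omega
    have hj : tj = 0 := by omega
    subst hK; subst hj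
    rw [loop5A_eq_ite, lucasB_eq_ite]
    simp
    omega
  | succ n ih =>
    intro tK tj acc h h0 h5
    rw [loop5A_eq_ite, lucasB_eq_ite]
    by_cases hbase : tK = 0 ∧ tj = 0
    · simp [hbase.1, hbase.2]; omega
    · have hcond : tK > 0 ∨ tj > 0 := by omega
      rw [if_pos hcond, if_neg hbase]
      by_cases hgt : tj % 5 > tK % 5
      · rw [if_pos hgt, if_pos hgt]
        simp
      · rw [if_neg hgt, if_neg hgt]
        have hrec := ih (tK / 5) (tj / 5) ((acc * (pascalMod5[tK % 5]!)[tj % 5]!) % 5)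
          (by omega) (Int.emod_nonneg _ (by norm_num)) (Int.emod_lt_of_pos _ (by norm_num))
        rw [hrec]
        have key : ∀ x y z : Int, ((x * y) % 5 * z) % 5 = (x * ((y * z) % 5)) % 5 := by
          intro x y z
          conv_lhs => rw [Int.mul_emod, Int.emod_emod_of_dvd _ (by norm_num), ← Int.mul_emod, mul_assoc]
          conv_rhs => rw [Int.mul_emod, Int.emod_emod_of_dvd _ (by norm_num), ← Int.mul_emod]
        have hc : ((5 : Nat) : Int) = 5 := by norm_num
        rw [hc, key]

theorem loop5A_eq (tK tj : Nat) (acc : Int) (h0 : 0 ≤ acc) (h5 : acc < 5) :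
    loop5A tK tj acc = (acc * lucasB 5 (by omega) pascalMod5 tK tj) % 5 :=
  loop5A_eq_aux (tK + tj) tK tj acc le_rfl h0 h5

-- ===== VERDICT (by name: the statement is the Claim_ definition above) =====
theorem get_coefficient_mod_10_impl_py_spec : Claim_equal_get_coefficient_mod_10_impl_py := by
  intro K j _
  unfold Spec_get_coefficient_mod_10_impl_py
  unfold get_coefficient_mod_10_impl_py get_coefficient_mod_10_impl_py_alt
  split
  · rfl
  · have h5 := loop5A_eq K.toNat j.toNat 1 (by norm_num) (by norm_num)
    have hb := lucasB_nonneg 5 (by omega) pascalMod5 K.toNat j.toNat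
    have hb2 : lucasB 5 (by omega) pascalMod5 K.toNat j.toNat < (5 : Int) := by
      exact_mod_cast hb.2
    rw [lucasB_two, h5, one_mul, Int.emod_eq_of_lt hb.1 hb2]
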